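-- pv_equiv track=rewrite | github.com/ovachiever/agent-sessions | agent_sessions/ui/widgets.py | find_all_matches
-- ===== SOURCE A (Python) =====
-- def find_all_matches(haystack: str, needle: str) -> list[int]:
--     """Return all start offsets of needle in haystack, case-insensitive.
--
--     Empty needle returns []. Uses casefold() for Unicode-aware matching.
--     """
--     if not needle:
--         return []
--     hay = haystack.casefold()
--     pin = needle.casefold()
--     if len(pin) != len(needle) and len(hay) != len(haystack):
--         # Casefold can change length (e.g. ß → ss); in that case offsets in
--         # the folded string don't map back. Fall back to plain lowercase, which
--         # is length-preserving for the scripts we realistically render.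
--         hay = haystack.lower()
--         pin = needle.lower()
--     out: list[int] = []
--     i = 0
--     while True:
--         j = hay.find(pin, i)
--         if j < 0:
--             break
--         out.append(j)
--         i = j + 1  # allow overlapping matches
--     return out
-- ===== SOURCE B (Python) =====
-- def find_all_matches(haystack: str, needle: str) -> list[int]:
--     """Return all start offsets of needle in haystack, case-insensitive.
--
--     Empty needle returns []. Uses casefold() for Unicode-aware matching.
--     """
--     if not needle:
--         return []
--     hay = haystack.casefold()
--     pin = needle.casefold()
--     if len(pin) != len(needle) and len(hay) != len(haystack):
--         hay = haystack.lower()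
--         pin = needle.lower()
--     return [i for i in range(len(hay) - len(pin) + 1)
--             if hay[i:i + len(pin)] == pin]
-- ===== Notes on version B (the rewrite author's own statement) =====
-- stated objective: idiomatic
-- what changed: Replaces the stateful while/str.find loop (restarting the search at each match + 1) with a single comprehension that tests every candidate offset by slice comparison over an explicit range.
import Mathlib
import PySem

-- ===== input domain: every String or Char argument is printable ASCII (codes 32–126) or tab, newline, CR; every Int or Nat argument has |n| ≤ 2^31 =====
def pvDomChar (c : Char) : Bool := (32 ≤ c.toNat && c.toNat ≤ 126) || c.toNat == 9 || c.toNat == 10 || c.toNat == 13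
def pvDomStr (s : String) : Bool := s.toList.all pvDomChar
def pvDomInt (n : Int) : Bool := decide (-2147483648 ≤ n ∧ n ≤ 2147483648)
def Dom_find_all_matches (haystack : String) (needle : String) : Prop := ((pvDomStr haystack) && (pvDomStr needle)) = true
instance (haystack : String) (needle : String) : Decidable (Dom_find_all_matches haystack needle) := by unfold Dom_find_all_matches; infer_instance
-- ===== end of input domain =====

-- B replaces A's stateful while/str.find search loop with a comprehension testing every
-- candidate offset by slice comparison; same offsets in the same order (objective: idiomatic).
-- str.casefold() is ported as PySem.Chars.lower: the two agree exactly on the ASCII Dom above.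

-- ===== PORT A =====
-- A's `while True: j = hay.find(pin, i); if j < 0: break; out.append(j); i = j + 1`,
-- as fuel recursion (fuel only makes the loop total; hay.length + 1 steps always suffice).
def findAllLoop (hay pin : List Char) (i : Nat) : Nat → List Int
  | 0 => []
  | fuel + 1 =>
    let j := PySem.Chars.findFrom hay pin (i : Int) none
    if j < 0 then []
    else j :: findAllLoop hay pin (j.toNat + 1) fuel

def find_all_matches (haystack : String) (needle : String) : List Int :=
  if needle.toList = [] then []
  else
    let hay := PySem.Chars.lower haystack.toList   -- haystack.casefold()
    let pin := PySem.Chars.lower needle.toList     -- needle.casefold()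
    let hp :=                                      -- length-changing-casefold fallback branch
      if pin.length ≠ needle.toList.length ∧ hay.length ≠ haystack.toList.length
      then (PySem.Chars.lower haystack.toList, PySem.Chars.lower needle.toList)
      else (hay, pin)
    findAllLoop hp.1 hp.2 0 (hp.1.length + 1)

-- ===== PORT B =====
def find_all_matches_alt (haystack : String) (needle : String) : List Int :=
  if needle.toList = [] then []
  else
    let hay := PySem.Chars.lower haystack.toList   -- haystack.casefold()
    let pin := PySem.Chars.lower needle.toList     -- needle.casefold()
    let hp :=                                      -- length-changing-casefold fallback branch
      if pin.length ≠ needle.toList.length ∧ hay.length ≠ haystack.toList.length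
      then (PySem.Chars.lower haystack.toList, PySem.Chars.lower needle.toList)
      else (hay, pin)
    -- [i for i in range(len(hay) - len(pin) + 1) if hay[i:i+len(pin)] == pin]
    (PySem.List.pyRange 0 ((hp.1.length : Int) - (hp.2.length : Int) + 1)).filter
      (fun i => PySem.List.slice hp.1 (some i) (some (i + (hp.2.length : Int))) == hp.2)

-- ===== PRECONDITION & SPEC =====
def Spec_find_all_matches (haystack : String) (needle : String) (out : List Int) : Prop := out = find_all_matches_alt haystack needle
instance (haystack : String) (needle : String) (out : List Int) : Decidable (Spec_find_all_matches haystack needle out) := by unfold Spec_find_all_matches; infer_instance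

-- ===== CLAIM (what is proved, stated in full; the proofs are below) =====
def Claim_equal_find_all_matches : Prop := ∀ (haystack : String) (needle : String), Dom_find_all_matches haystack needle → Spec_find_all_matches haystack needle (find_all_matches haystack needle)

-- ===== LEMMAS AND PROOFS =====

-- The canonical answer: all offsets k ≤ |hay| where pin is a prefix of hay.drop k, ascending.
def matchPositions (hay pin : List Char) : List Nat :=
  (List.range (hay.length + 1)).filter (fun k => decide (pin <+: hay.drop k))

theorem prefix_drop_le (hay pin : List Char) (k : Nat) (h : pin <+: hay.drop k) :
    k + pin.length ≤ hay.length ∨ pin = [] := by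
  rcases Nat.lt_or_ge k hay.length with hk | hk
  · left
    have := h.length_le
    simp [List.length_drop] at this
    omega
  · right
    have : hay.drop k = [] := List.drop_eq_nil_of_le hk
    rw [this] at h
    simpa using List.prefix_nil.mp h

-- A's loop computes exactly the match positions from k upward.
theorem findAllLoop_eq (hay pin : List Char) (hpin : pin ≠ []) :
    ∀ fuel k, k ≤ hay.length → hay.length + 1 - k ≤ fuel →
    findAllLoop hay pin k fuel =
      ((List.range' k (hay.length + 1 - k)).filter (fun t => decide (pin <+: hay.drop t))).map
        Int.ofNat := by
  intro fuel
  induction fuel with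
  | zero => intro k hk hf; omega
  | succ fuel ih =>
    intro k hk hf
    rw [findAllLoop]
    by_cases hneg : PySem.Chars.findFrom hay pin (k : Int) none < 0
    · -- no further match: every position ≥ k fails
      have hne : PySem.Chars.findFrom hay pin (k : Int) = -1 := by
        have := PySem.Chars.neg_one_le_find (List.drop k hay) pin
        rw [PySem.Chars.findFrom_natCast hay pin k hk] at hneg ⊢
        split at hneg <;> split_ifs <;> omega
      have hnin : ¬ pin <:+: hay.drop k := (PySem.Chars.findFrom_natCast_eq_neg_one_iff hay pin k hk).mp hne
      simp only [hneg, if_pos]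
      symm
      rw [List.map_eq_nil_iff, List.filter_eq_nil_iff]
      intro t ht
      have htk : k ≤ t := (List.mem_range'_1.mp ht).1
      simp only [decide_eq_true_eq]
      intro hpre
      apply hnin
      rw [← (PySem.Chars.isIn_iff_infix pin (hay.drop k)), ← PySem.Chars.exists_prefix_drop_iff_isIn]
      refine ⟨t - k, ?_⟩
      rw [List.drop_drop]
      rwa [show k + (t - k) = t from by omega]
    · -- a match at j = findFrom …; split the range at j
      have hne : PySem.Chars.findFrom hay pin (k : Int) ≠ -1 := by
        intro h; rw [h] at hneg; exact hneg (by norm_num)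
      obtain ⟨hkj, hpre, hmin⟩ := PySem.Chars.findFrom_natCast_spec hay pin k hk hne
      set j := PySem.Chars.findFrom hay pin (k : Int) with hj
      have hj0 : 0 ≤ j := by omega
      have hjn : j = ((j.toNat : Nat) : Int) := by omega
      have hkjn : k ≤ j.toNat := by omega
      have hjle : j.toNat + pin.length ≤ hay.length := by
        rcases prefix_drop_le hay pin j.toNat hpre with h | h
        · exact h
        · exact absurd h hpin
      have hplen : 1 ≤ pin.length := Nat.one_le_iff_ne_zero.mpr (by simpa using hpin)
      have hjlt : j.toNat + 1 ≤ hay.length := by omega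
      simp only [if_neg hneg]
      rw [ih (j.toNat + 1) hjlt (by omega)]
      -- range' k (L+1-k) = range' k (jn-k) ++ range' jn 1 ++ range' (jn+1) (L-jn)
      have hsplit : List.range' k (hay.length + 1 - k) =
          List.range' k (j.toNat - k) ++ List.range' j.toNat 1 ++
          List.range' (j.toNat + 1) (hay.length + 1 - (j.toNat + 1)) := by
        rw [List.append_assoc]
        have h1 : List.range' j.toNat 1 ++ List.range' (j.toNat + 1) (hay.length + 1 - (j.toNat + 1)) =
            List.range' j.toNat (1 + (hay.length + 1 - (j.toNat + 1))) := by
          have := @List.range'_append j.toNat 1 (hay.length + 1 - (j.toNat + 1)) 1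
          simpa using this
        rw [h1]
        have h2 := @List.range'_append k (j.toNat - k) (1 + (hay.length + 1 - (j.toNat + 1))) 1
        have h3 : k + 1 * (j.toNat - k) = j.toNat := by omega
        rw [h3] at h2
        rw [h2]
        congr 1
        omega
      rw [hsplit, List.filter_append, List.filter_append]
      have hfirst : (List.range' k (j.toNat - k)).filter (fun t => decide (pin <+: hay.drop t)) = [] := by
        rw [List.filter_eq_nil_iff]
        intro t ht
        have := List.mem_range'_1.mp ht
        simp only [decide_eq_true_eq]
        exact hmin t this.1 (by omega)
      have hmid : (List.range' j.toNat 1).filter (fun t => decide (pin <+: hay.drop t)) = [j.toNat] := by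
        rw [List.range'_one]
        simp [hpre]
      rw [hfirst, hmid]
      rw [List.nil_append, List.singleton_append, List.map_cons]
      congr 1

-- B's filtered range equals the match positions (the tail positions k with |hay|-|pin| < k never match).
theorem alt_filter_eq (hay pin : List Char) (hpin : pin ≠ []) :
    (PySem.List.pyRange 0 ((hay.length : Int) - (pin.length : Int) + 1)).filter
      (fun i => PySem.List.slice hay (some i) (some (i + (pin.length : Int))) == pin) =
    (matchPositions hay pin).map Int.ofNat := by
  have hplen : 1 ≤ pin.length := Nat.one_le_iff_ne_zero.mpr (by simpa using hpin)
  rw [PySem.List.pyRange_one, List.filter_map]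
  set N := ((hay.length : Int) - (pin.length : Int) + 1 - 0).toNat with hN
  have hcongr : ∀ k ∈ List.range N,
      ((fun i => PySem.List.slice hay (some i) (some (i + (pin.length : Int))) == pin) ∘
        (fun k : Nat => (0 : Int) + k)) k = decide (pin <+: hay.drop k) := by
    intro k _
    simp only [Function.comp, zero_add]
    rw [PySem.List.slice_natCast_add hay k pin.length]
    rcases Decidable.em (pin <+: hay.drop k) with h | h
    · have : List.take pin.length (List.drop k hay) = pin := (List.prefix_iff_eq_take.mp h).symm
      simp [this, h]
    · have : List.take pin.length (List.drop k hay) ≠ pin := by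
        intro he
        exact h (List.prefix_iff_eq_take.mpr he.symm)
      simp [this, h]
  rw [List.filter_congr hcongr]
  unfold matchPositions
  have hrange : List.range (hay.length + 1) =
      List.range N ++ (List.range' N (hay.length + 1 - N)) := by
    have hap := @List.range'_append 0 N (hay.length + 1 - N) 1
    simp only [one_mul, zero_add] at hap
    have hM : hay.length + 1 = N + (hay.length + 1 - N) := by omega
    rw [List.range_eq_range']
    conv_lhs => rw [hM]
    rw [← hap, List.range_eq_range']
  have htail : (List.range' N (hay.length + 1 - N)).filter (fun k => decide (pin <+: hay.drop k)) = [] := by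
    rw [List.filter_eq_nil_iff]
    intro t ht
    have htN : N ≤ t := (List.mem_range'_1.mp ht).1
    simp only [decide_eq_true_eq]
    intro hpre
    rcases prefix_drop_le hay pin t hpre with h | h
    · omega
    · exact hpin h
  rw [hrange, List.filter_append, htail, List.append_nil]
  simp [Int.ofNat_eq_natCast]

-- ===== VERDICT (by name: the statement is the Claim_ definition above) =====
theorem find_all_matches_spec : Claim_equal_find_all_matches := by
  intro haystack needle _
  unfold Spec_find_all_matches find_all_matches find_all_matches_alt
  by_cases hn : needle.toList = []
  · simp [hn]
  · simp only [if_neg hn, ite_self]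
    have hpin : PySem.Chars.lower needle.toList ≠ [] := by
      unfold PySem.Chars.lower
      simpa using hn
    rw [findAllLoop_eq (PySem.Chars.lower haystack.toList) (PySem.Chars.lower needle.toList)
        hpin ((PySem.Chars.lower haystack.toList).length + 1) 0 (by omega) (by omega),
      alt_filter_eq (PySem.Chars.lower haystack.toList) (PySem.Chars.lower needle.toList) hpin]
    unfold matchPositions
    rw [List.range_eq_range']
    simp
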